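-- pv_equiv track=rewrite | github.com/gabesenese/A.L.I.C.E | scripts/utilities/promote_patterns.py | _detect_variable_slots
-- ===== SOURCE A (Python) =====
-- from typing import List, Dict, Any, Optional, Set
--
-- def _detect_variable_slots(examples: List[str]) -> Dict[str, str]:
--     """
--     Detect variable slots in examples
--
--     Args:
--         examples: List of similar inputs
--
--     Returns:
--         Dict of slot names to patterns (e.g., {"entity": "PERSON"})
--     """
--     # Simple heuristic: if words differ at same position across examples,
--     # it's likely a variable slot
--
--     if len(examples) < 2:
--         return {}
--
--     # Tokenize all examples
--     tokenized = [example.split() for example in examples]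
--
--     # Find positions where words differ
--     variable_positions = set()
--     min_len = min(len(tokens) for tokens in tokenized)
--
--     for i in range(min_len):
--         words_at_pos = set(tokens[i] for tokens in tokenized)
--         if len(words_at_pos) > 1:  # Different words at this position
--             variable_positions.add(i)
--
--     # Create slot names based on position
--     slots = {}
--     for pos in sorted(variable_positions):
--         # Get example values
--         values = [tokens[pos] for tokens in tokenized if len(tokens) > pos]
--
--         # Determine slot type (simple heuristic)
--         if all(v.isdigit() for v in values):
--             slots[f"number_{pos}"] = "NUMBER"
--         elif all('@' in v for v in values):
--             slots[f"email_{pos}"] = "EMAIL"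
--         else:
--             slots[f"entity_{pos}"] = "TEXT"
--
--     return slots
-- ===== SOURCE B (Python) =====
-- def _detect_variable_slots(examples):
--     """Row-streaming re-implementation: fold over the examples, maintaining one
--     per-position record (reference token, differs?, all-digits?, all-have-@?),
--     merged elementwise with zip; never builds per-position value sets."""
--     if len(examples) < 2:
--         return {}
--     rows = [example.split() for example in examples]
--     state = [(t, False, t.isdigit(), '@' in t) for t in rows[0]]
--     for toks in rows[1:]:
--         state = [(ref, df or t != ref, dg and t.isdigit(), at and '@' in t)
--                  for (ref, df, dg, at), t in zip(state, toks)]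
--     slots = {}
--     for i, (_, df, dg, at) in enumerate(state):
--         if df:
--             if dg:
--                 slots[f"number_{i}"] = "NUMBER"
--             elif at:
--                 slots[f"email_{i}"] = "EMAIL"
--             else:
--                 slots[f"entity_{i}"] = "TEXT"
--     return slots
-- ===== Notes on version B (the rewrite author's own statement) =====
-- stated objective: alternative
-- what changed: B replaces A's column-wise passes (per-position value sets, then a sorted second pass re-collecting column values) by a row-streaming fold over the examples that zip-merges one per-position record (reference token, differs?, all-digits?, all-have-@?) per example and emits slots in a single final scan of the records.
import Mathlib
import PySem

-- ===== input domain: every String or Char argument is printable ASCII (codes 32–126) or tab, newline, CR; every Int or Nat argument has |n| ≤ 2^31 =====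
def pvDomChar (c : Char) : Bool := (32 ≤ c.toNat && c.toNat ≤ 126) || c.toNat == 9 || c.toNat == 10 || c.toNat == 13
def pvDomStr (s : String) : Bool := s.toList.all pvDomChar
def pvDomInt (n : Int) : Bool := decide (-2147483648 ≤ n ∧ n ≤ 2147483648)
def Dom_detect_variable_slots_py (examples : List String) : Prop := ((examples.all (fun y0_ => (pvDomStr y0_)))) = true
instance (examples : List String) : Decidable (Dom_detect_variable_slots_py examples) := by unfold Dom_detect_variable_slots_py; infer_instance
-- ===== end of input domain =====

-- B streams over the EXAMPLES (rows), zip-merging one per-position record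
-- (reference token, differs?, all-digits?, all-have-@?) per example, instead of A's
-- column-wise passes that build a value set per position (objective: alternative).

-- ===== PORT A =====
def detect_variable_slots_py (examples : List String) : List (String × String) :=
  if examples.length < 2 then []
  else
    let tokenized := examples.map (fun e => PySem.Str.split₀ e)
    -- min(len(tokens) for tokens in tokenized); tokenized is nonempty here so min? is some
    let min_len : Int := (PySem.List.min? (tokenized.map (fun tokens => (tokens.length : Int))) (fun y => y)).getD 0
    let variable_positions : PySem.Set Int :=
      (PySem.List.pyRange 0 min_len 1).foldl (fun (acc : PySem.Set Int) i =>
        let words_at_pos := PySem.Set.ofList (tokenized.map (fun tokens => PySem.List.pyGetD tokens i ""))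
        if PySem.Set.len words_at_pos > 1 then PySem.Set.add acc i else acc) PySem.Set.empty
    let slots := (PySem.List.sorted variable_positions (fun x => x)).foldl
      (fun (slots : PySem.Dict String String) pos =>
        let values := (tokenized.filter (fun tokens => pos < (tokens.length : Int))).map
            (fun tokens => PySem.List.pyGetD tokens pos "")
        if values.all (fun v => PySem.Str.strIsdigit v) then
          slots.insert ("number_" ++ PySem.Int.toStr pos) "NUMBER"
        else if values.all (fun v => PySem.Str.isIn "@" v) then
          slots.insert ("email_" ++ PySem.Int.toStr pos) "EMAIL"
        else
          slots.insert ("entity_" ++ PySem.Int.toStr pos) "TEXT") PySem.Dict.empty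
    slots.items

-- ===== PORT B =====
-- initial per-position records from the first example's tokens
def pvInit (toks : List String) : List (String × Bool × Bool × Bool) :=
  toks.map (fun t => (t, false, PySem.Str.strIsdigit t, PySem.Str.isIn "@" t))

-- the zip-merge of the running records with one further example's tokens
def pvMergeRow (state : List (String × Bool × Bool × Bool)) (toks : List String) :
    List (String × Bool × Bool × Bool) :=
  (state.zip toks).map (fun p =>
    (p.1.1, p.1.2.1 || (p.2 != p.1.1), p.1.2.2.1 && PySem.Str.strIsdigit p.2,
     p.1.2.2.2 && PySem.Str.isIn "@" p.2))

-- emit a slot for one enumerated record, skipping positions that never differed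
def pvEmit (slots : PySem.Dict String String) (p : Int × (String × Bool × Bool × Bool)) :
    PySem.Dict String String :=
  if p.2.2.1 then
    if p.2.2.2.1 then slots.insert ("number_" ++ PySem.Int.toStr p.1) "NUMBER"
    else if p.2.2.2.2 then slots.insert ("email_" ++ PySem.Int.toStr p.1) "EMAIL"
    else slots.insert ("entity_" ++ PySem.Int.toStr p.1) "TEXT"
  else slots

def detect_variable_slots_py_alt (examples : List String) : List (String × String) :=
  if examples.length < 2 then []
  else
    match examples.map (fun e => PySem.Str.split₀ e) with
    | [] => []  -- unreachable: examples has ≥ 2 elements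
    | r0 :: rest =>
      let state := rest.foldl pvMergeRow (pvInit r0)
      ((PySem.List.enumerate state).foldl pvEmit PySem.Dict.empty).items

-- ===== PRECONDITION & SPEC =====
def Spec_detect_variable_slots_py (examples : List String) (out : List (String × String)) : Prop := out = detect_variable_slots_py_alt examples
instance (examples : List String) (out : List (String × String)) : Decidable (Spec_detect_variable_slots_py examples out) := by unfold Spec_detect_variable_slots_py; infer_instance

-- ===== CLAIM (what is proved, stated in full; the proofs are below) =====
def Claim_equal_detect_variable_slots_py : Prop := ∀ (examples : List String), Dom_detect_variable_slots_py examples → Spec_detect_variable_slots_py examples (detect_variable_slots_py examples)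

-- ===== LEMMAS AND PROOFS =====

-- the column at a Nat position
def pvColAt (T : List (List String)) (i : Nat) : List String := T.map (fun ys => ys.getD i "")

-- A's "words differ at position i" test
def pvCond (T : List (List String)) (i : Nat) : Bool :=
  decide (PySem.Set.len (PySem.Set.ofList (pvColAt T i)) > 1)

-- B's record at position i, expressed over the rows
def pvFlags (t0 : List String) (rest : List (List String)) (i : Nat) :
    String × Bool × Bool × Bool :=
  (t0.getD i "",
   rest.any (fun r => r.getD i "" != t0.getD i ""),
   PySem.Str.strIsdigit (t0.getD i "") && rest.all (fun r => PySem.Str.strIsdigit (r.getD i "")),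
   PySem.Str.isIn "@" (t0.getD i "") && rest.all (fun r => PySem.Str.isIn "@" (r.getD i "")))

def pvDefRec : String × Bool × Bool × Bool := ("", false, false, false)

-- a running Nat-minimum is ≤ its seed and ≤ every list element
theorem pv_foldl_min_le (l : List Nat) (a : Nat) :
    l.foldl min a ≤ a ∧ ∀ u ∈ l, l.foldl min a ≤ u := by
  induction l generalizing a with
  | nil => exact ⟨le_refl _, by simp⟩
  | cons u l ih =>
    refine ⟨le_trans ((ih (min a u)).1) (min_le_left _ _), ?_⟩
    intro w hw
    rcases List.mem_cons.mp hw with h | h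
    · subst h; exact le_trans ((ih (min a w)).1) (min_le_right _ _)
    · exact (ih (min a u)).2 w h

-- cast of a Nat running-min
theorem pv_foldl_min_cast (l : List (List String)) (a : Nat) :
    l.foldl (fun (b : Int) t => min b (t.length : Int)) (a : Int)
      = ((l.foldl (fun (b : Nat) t => min b t.length) a : Nat) : Int) := by
  induction l generalizing a with
  | nil => rfl
  | cons x l ih =>
    rw [List.foldl_cons, List.foldl_cons, ← Nat.cast_min]
    exact ih _

-- the set-building loop over nodup inputs appends exactly the passing elements
theorem pv_foldl_add_filter (p : Nat → Bool) (xs : List Nat) (acc : PySem.Set Int)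
    (hnd : xs.Nodup) (hdisj : ∀ x ∈ xs, ((x : Int)) ∉ acc) :
    xs.foldl (fun (s : PySem.Set Int) i => if p i then PySem.Set.add s (i : Int) else s) acc
      = acc ++ (xs.filter p).map (fun (i : Nat) => (i : Int)) := by
  induction xs generalizing acc with
  | nil => simp
  | cons x xs ih =>
    have hx : ((x : Int)) ∉ acc := hdisj x (List.mem_cons_self)
    have hnd' := (List.nodup_cons.mp hnd).2
    have hxx := (List.nodup_cons.mp hnd).1
    by_cases hp : p x
    · rw [List.foldl_cons]
      simp only [hp, if_pos]
      rw [PySem.Set.add_of_not_mem hx,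
        ih (acc ++ [(x : Int)]) hnd' (by
          intro y hy
          simp only [List.mem_append, List.mem_singleton]
          rintro (h | h)
          · exact hdisj y (List.mem_cons_of_mem _ hy) h
          · exact hxx (by rwa [show y = x from by exact_mod_cast h] at hy))]
      simp [hp]
    · rw [List.foldl_cons]
      simp only [hp, if_neg, Bool.false_eq_true, not_false_iff]
      rw [ih acc hnd' (fun y hy => hdisj y (List.mem_cons_of_mem _ hy))]
      simp [hp]

theorem pv_enumerate_map {α β : Type} (g : α → β) (xs : List α) (s : Int) :
    PySem.List.enumerate (xs.map g) s = (PySem.List.enumerate xs s).map (fun p => (p.1, g p.2)) := by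
  induction xs generalizing s with
  | nil => simp [PySem.List.enumerate_nil]
  | cons x xs ih => simp [PySem.List.enumerate_cons, ih]

theorem pv_enumerate_range (m : Nat) :
    PySem.List.enumerate (List.range m) 0 = (List.range m).map (fun (i : Nat) => ((i : Int), i)) := by
  induction m with
  | zero => rfl
  | succ m ih =>
    rw [List.range_succ, PySem.List.enumerate_append, ih, List.map_append]
    simp [PySem.List.enumerate_cons, PySem.List.enumerate_nil]

-- set(col) of a constant-tail column collapses to the head
theorem pv_ofList_const (x : String) (xs : List String) (h : ∀ y ∈ xs, y = x) :
    PySem.Set.ofList (x :: xs) = [x] := by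
  have key : ∀ (l : List String), (∀ y ∈ l, y = x) → l.foldl PySem.Set.add [x] = [x] := by
    intro l
    induction l with
    | nil => intro _; rfl
    | cons y l ih =>
      intro hl
      rw [List.foldl_cons, hl y (List.mem_cons_self)]
      have : PySem.Set.add [x] x = [x] := by
        simp [PySem.Set.add, PySem.Set.contains]
      rw [this]
      exact ih (fun z hz => hl z (List.mem_cons_of_mem _ hz))
  have h0 : PySem.Set.ofList (x :: xs) = xs.foldl PySem.Set.add [x] := by
    simp [PySem.Set.ofList, PySem.Set.empty, PySem.Set.add, PySem.Set.contains]
  rw [h0]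
  exact key xs h

-- "more than one distinct word" at a position ↔ some later word differs from the first
theorem pv_one_lt_len_cons (x : String) (xs : List String) :
    (1 < PySem.Set.len (PySem.Set.ofList (x :: xs))) ↔ ∃ y ∈ xs, y ≠ x := by
  constructor
  · intro hlen
    by_contra hno
    push Not at hno
    rw [pv_ofList_const x xs hno] at hlen
    simp [PySem.Set.len] at hlen
  · rintro ⟨y, hy, hyx⟩
    have hxm : x ∈ PySem.Set.ofList (x :: xs) := (PySem.Set.mem_ofList _ _).mpr (List.mem_cons_self)
    have hym : y ∈ PySem.Set.ofList (x :: xs) :=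
      (PySem.Set.mem_ofList _ _).mpr (List.mem_cons_of_mem _ hy)
    have : 1 < (PySem.Set.ofList (x :: xs)).length := by
      rcases hll : PySem.Set.ofList (x :: xs) with _ | ⟨a, _ | ⟨b, l⟩⟩
      · rw [hll] at hxm; simp at hxm
      · rw [hll] at hxm hym
        simp at hxm hym
        exact absurd (hym.trans hxm.symm) hyx
      · simp
    simpa [PySem.Set.len] using this
  -- the merge fold, characterised pointwise over an arbitrary initial record list
theorem pv_fold_merge (rest : List (List String)) (init : List (String × Bool × Bool × Bool)) :
    rest.foldl pvMergeRow init =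
      (List.range ((rest.map List.length).foldl min init.length)).map (fun i =>
        ((init.getD i pvDefRec).1,
         (init.getD i pvDefRec).2.1 || rest.any (fun r => r.getD i "" != (init.getD i pvDefRec).1),
         (init.getD i pvDefRec).2.2.1 && rest.all (fun r => PySem.Str.strIsdigit (r.getD i "")),
         (init.getD i pvDefRec).2.2.2 && rest.all (fun r => PySem.Str.isIn "@" (r.getD i "")))) := by
  induction rest generalizing init with
  | nil =>
    simp only [List.foldl_nil, List.map_nil, List.any_nil, List.all_nil,
      Bool.or_false, Bool.and_true]
    apply List.ext_getElem (by simp)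
    intro i h1 h2
    simp [List.getElem?_eq_getElem h1]
  | cons r rs ih =>
    rw [List.foldl_cons, ih]
    have hlen : (pvMergeRow init r).length = min init.length r.length := by
      simp [pvMergeRow]
    rw [List.map_cons, List.foldl_cons, hlen]
    apply List.map_congr_left
    intro i hi
    have him : i < (rs.map List.length).foldl min (min init.length r.length) :=
      List.mem_range.mp hi
    have hile : i < min init.length r.length :=
      lt_of_lt_of_le him (pv_foldl_min_le _ _).1
    have hii : i < init.length := lt_of_lt_of_le hile (min_le_left _ _)
    have hir : i < r.length := lt_of_lt_of_le hile (min_le_right _ _)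
    have hiz : i < (pvMergeRow init r).length := by rw [hlen]; exact hile
    have hm : (pvMergeRow init r).getD i pvDefRec
        = ((init.getD i pvDefRec).1,
           (init.getD i pvDefRec).2.1 || (r.getD i "" != (init.getD i pvDefRec).1),
           (init.getD i pvDefRec).2.2.1 && PySem.Str.strIsdigit (r.getD i ""),
           (init.getD i pvDefRec).2.2.2 && PySem.Str.isIn "@" (r.getD i "")) := by
      rw [List.getD_eq_getElem _ _ hiz, List.getD_eq_getElem _ _ hii, List.getD_eq_getElem _ _ hir]
      simp [pvMergeRow]
    rw [hm]
    simp [List.any_cons, List.all_cons, Bool.or_assoc, Bool.and_assoc]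

-- specialisation to B's initial records: the final state lists pvFlags over range m
theorem pv_state_flags (t0 : List String) (rest : List (List String)) :
    rest.foldl pvMergeRow (pvInit t0)
      = (List.range ((rest.map List.length).foldl min t0.length)).map (pvFlags t0 rest) := by
  rw [pv_fold_merge]
  have hl : (pvInit t0).length = t0.length := by simp [pvInit]
  rw [hl]
  apply List.map_congr_left
  intro i hi
  have hit : i < t0.length := lt_of_lt_of_le (List.mem_range.mp hi) (pv_foldl_min_le _ _).1
  have hii : i < (pvInit t0).length := by rw [hl]; exact hit
  have hinit : (pvInit t0).getD i pvDefRec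
      = (t0.getD i "", false, PySem.Str.strIsdigit (t0.getD i ""), PySem.Str.isIn "@" (t0.getD i "")) := by
    rw [List.getD_eq_getElem _ _ hii, List.getD_eq_getElem _ _ hit]
    simp [pvInit]
  rw [hinit]
  simp [pvFlags]

theorem detect_variable_slots_py_spec' (examples : List String) :
    detect_variable_slots_py examples = detect_variable_slots_py_alt examples := by
  unfold detect_variable_slots_py detect_variable_slots_py_alt
  by_cases hlen : examples.length < 2
  · simp [hlen]
  · simp only [hlen, if_neg, not_false_iff]
    set T := examples.map (fun e => PySem.Str.split₀ e) with hT
    -- T is nonempty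
    obtain ⟨t0, rest, hTc⟩ : ∃ t0 rest, T = t0 :: rest := by
      cases examples with
      | nil => simp at hlen
      | cons a l => exact ⟨PySem.Str.split₀ a, l.map (fun e => PySem.Str.split₀ e), rfl⟩
    set m : Nat := (rest.map List.length).foldl min t0.length with hm
    -- every token list has length ≥ m
    have hmle : ∀ t ∈ T, m ≤ t.length := by
      intro t ht
      rw [hTc] at ht
      rcases List.mem_cons.mp ht with h | h
      · subst h
        have := (pv_foldl_min_le ((rest.map List.length)) t.length).1
        simpa [hm] using this
      · have := (pv_foldl_min_le ((rest.map List.length)) t0.length).2 t.length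
          (List.mem_map_of_mem h)
        simpa [hm] using this
    -- A's min_len is ↑m
    have hmin : (PySem.List.min? (T.map (fun tokens => (tokens.length : Int))) (fun y => y)).getD 0 = (m : Int) := by
      rw [hTc]
      simp only [List.map_cons]
      rw [PySem.List.min?_id_cons]
      simp only [Option.getD_some]
      rw [List.foldl_map, pv_foldl_min_cast, hm, List.foldl_map]
    rw [hmin]
    -- A's inner column equals pvColAt on Nat positions
    have hcol : ∀ i : Nat, T.map (fun tokens => PySem.List.pyGetD tokens (i : Int) "") = pvColAt T i := by
      intro i
      unfold pvColAt
      apply List.map_congr_left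
      intro t _
      exact PySem.List.pyGetD_natCast t i ""
    -- A's variable_positions set
    have hvar :
        (PySem.List.pyRange 0 (m : Int) 1).foldl (fun (acc : PySem.Set Int) i =>
          if PySem.Set.len (PySem.Set.ofList (T.map (fun tokens => PySem.List.pyGetD tokens i ""))) > 1
          then PySem.Set.add acc i else acc) PySem.Set.empty
        = ((List.range m).filter (pvCond T)).map (fun (i : Nat) => (i : Int)) := by
      rw [PySem.List.pyRange_zero_nat, List.foldl_map]
      rw [PySem.List.foldl_congr_mem (List.range m) _
        (fun (acc : PySem.Set Int) (i : Nat) => if pvCond T i then PySem.Set.add acc ((i : Nat) : Int) else acc)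
        PySem.Set.empty
        (by
          intro acc i _
          rw [hcol i]
          unfold pvCond
          split_ifs with h1 <;> simp_all)]
      rw [pv_foldl_add_filter (pvCond T) (List.range m) PySem.Set.empty (List.nodup_range) (by simp [PySem.Set.empty])]
      simp [PySem.Set.empty]
    rw [hvar]
    -- sorted of an increasing list is itself
    have hsorted : PySem.List.sorted (((List.range m).filter (pvCond T)).map (fun (i : Nat) => (i : Int))) (fun x => x)
        = ((List.range m).filter (pvCond T)).map (fun (i : Nat) => (i : Int)) := by
      apply PySem.List.sorted_eq_of_perm_of_pairwise_lt _ _ _ (List.Perm.refl _)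
      have h1 : ((List.range m).filter (pvCond T)).Pairwise (· < ·) :=
        (List.pairwise_lt_range).filter _
      exact (List.pairwise_map).mpr (h1.imp (by intro a b h; exact_mod_cast h))
    rw [hsorted]
    -- B side: unfold the row fold into pvFlags over range m, then into a guarded range fold
    rw [hTc]
    show _ = (List.foldl pvEmit PySem.Dict.empty
      (PySem.List.enumerate (List.foldl pvMergeRow (pvInit t0) rest))).items
    rw [pv_state_flags t0 rest, ← hm]
    rw [pv_enumerate_map, pv_enumerate_range, List.map_map, List.foldl_map, List.foldl_map]
    -- B's guard at i is exactly pvCond (t0 :: rest) i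
    have hguard : ∀ i : Nat, (pvFlags t0 rest i).2.1 = pvCond (t0 :: rest) i := by
      intro i
      rw [Bool.eq_iff_iff]
      unfold pvFlags pvCond pvColAt
      simp only [List.map_cons, gt_iff_lt, decide_eq_true_eq]
      rw [pv_one_lt_len_cons]
      simp [List.any_eq_true, bne_iff_ne]
    -- turn B's guarded fold over range m into an unguarded fold over the filtered range
    have hB : (List.range m).foldl
        (fun (slots : PySem.Dict String String) (i : Nat) => pvEmit slots ((i : Int), pvFlags t0 rest i)) PySem.Dict.empty
        = ((List.range m).filter (pvCond (t0 :: rest))).foldl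
            (fun (slots : PySem.Dict String String) (i : Nat) => pvEmit slots ((i : Int), pvFlags t0 rest i)) PySem.Dict.empty := by
      rw [List.foldl_filter]
      apply PySem.List.foldl_congr_mem
      intro slots i _
      unfold pvEmit
      rw [hguard i]
      split_ifs with h1 <;> simp_all
    simp only [Function.comp]
    rw [hB]
    -- bodies agree on the members of the filtered range
    congr 1
    apply PySem.List.foldl_congr_mem'
    intro i hi slots
    have him : i ∈ List.range m := List.mem_of_mem_filter hi
    have hcond : pvCond (t0 :: rest) i = true := List.of_mem_filter hi
    have hilt : i < m := List.mem_range.mp him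
    have hfilt : (t0 :: rest).filter (fun tokens => decide ((i : Int) < (tokens.length : Int))) = (t0 :: rest) := by
      apply List.filter_eq_self.mpr
      intro t ht
      have := hmle t (by rw [hTc]; exact ht)
      simp only [decide_eq_true_eq]
      exact_mod_cast lt_of_lt_of_le hilt this
    have hcoli := hcol i
    rw [hTc] at hcoli
    rw [hfilt, hcoli]
    -- A's per-position value tests are B's accumulated flags
    have hdg : (pvColAt (t0 :: rest) i).all (fun v => PySem.Str.strIsdigit v)
        = (pvFlags t0 rest i).2.2.1 := by
      unfold pvColAt pvFlags
      simp [List.all_map, Function.comp_def]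
    have hat : (pvColAt (t0 :: rest) i).all (fun v => PySem.Str.isIn "@" v)
        = (pvFlags t0 rest i).2.2.2 := by
      unfold pvColAt pvFlags
      simp [List.all_map, Function.comp_def]
    unfold pvEmit
    rw [hguard i, hcond, if_pos rfl, hdg, hat]

-- ===== VERDICT (by name: the statement is the Claim_ definition above) =====
theorem detect_variable_slots_py_spec : Claim_equal_detect_variable_slots_py := by
  intro examples _
  exact detect_variable_slots_py_spec' examples
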